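-- pv_equiv track=rewrite | github.com/srisaipog/ICS4U-Classwork | Assessment Practice/Final Test Prep/array6.py | array6
-- ===== SOURCE A (Python) =====
-- from typing import List
--
-- def array6(nums: List[int], index: int) -> bool:
--     if len(nums) < 1:
--         return False
--
--     if index >= len(nums):
--         return False
--
--     if nums[index] == 6:
--         return True
--     else:
--         return False or array6(nums, index + 1)
-- ===== SOURCE B (Python) =====
-- from typing import List
--
-- def array6(nums: List[int], index: int) -> bool:
--     if not nums:
--         return False
--     for i in range(index, len(nums)):
--         if nums[i] == 6:
--             return True
--     return False
-- ===== Notes on version B (the rewrite author's own statement) =====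
-- stated objective: simpler
-- what changed: Replaced the tail recursion with a single iterative range loop over the same visit sequence (negative indices included).
import Mathlib
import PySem

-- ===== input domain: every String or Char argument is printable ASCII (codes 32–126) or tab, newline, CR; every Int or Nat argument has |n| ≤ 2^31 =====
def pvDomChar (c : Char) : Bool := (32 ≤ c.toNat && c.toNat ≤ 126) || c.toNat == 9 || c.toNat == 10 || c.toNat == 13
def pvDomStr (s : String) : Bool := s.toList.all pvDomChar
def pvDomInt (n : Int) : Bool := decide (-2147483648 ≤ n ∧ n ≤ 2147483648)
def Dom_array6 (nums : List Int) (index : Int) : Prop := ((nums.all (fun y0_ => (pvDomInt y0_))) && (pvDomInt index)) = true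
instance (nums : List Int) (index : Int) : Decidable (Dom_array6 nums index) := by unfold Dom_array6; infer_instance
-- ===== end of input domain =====

-- B replaces A's tail recursion by a single iterative range loop over the same index sequence (simpler decomposition, same cost).


-- ===== PORT A =====
def array6 (nums : List Int) (index : Int) : Bool :=
  if nums.length < 1 then false
  else if index ≥ (nums.length : Int) then false
  else if PySem.List.pyGetD nums index 0 = 6 then true
  else array6 nums (index + 1)
termination_by ((nums.length : Int) - index).toNat
decreasing_by omega

-- ===== PORT B =====
def array6_alt (nums : List Int) (index : Int) : Bool :=
  if nums.isEmpty then false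
  else (PySem.List.pyRange index (nums.length : Int) 1).any
    (fun i => PySem.List.pyGetD nums i 0 == 6)

-- ===== PRECONDITION & SPEC =====
-- Pre_ excludes exactly the inputs where the Python raises IndexError: a nonempty list with index < -len(nums).
def Pre_array6 (nums : List Int) (index : Int) : Prop :=
  nums = [] ∨ -(nums.length : Int) ≤ index
instance (nums : List Int) (index : Int) : Decidable (Pre_array6 nums index) := by
  unfold Pre_array6; infer_instance
def pvWitness_array6 : List Int × Int := ([1, 6, 3], -2)

def Spec_array6 (nums : List Int) (index : Int) (out : Bool) : Prop := out = array6_alt nums index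
instance (nums : List Int) (index : Int) (out : Bool) : Decidable (Spec_array6 nums index out) := by unfold Spec_array6; infer_instance

-- ===== CLAIM (what is proved, stated in full; the proofs are below) =====
def Claim_equal_array6 : Prop := ∀ (nums : List Int) (index : Int), Dom_array6 nums index → Pre_array6 nums index → Spec_array6 nums index (array6 nums index)

-- ===== LEMMAS AND PROOFS =====
theorem array6_eq_any (nums : List Int) :
    ∀ index : Int, nums ≠ [] → -(nums.length : Int) ≤ index →
    array6 nums index
      = (PySem.List.pyRange index (nums.length : Int) 1).any
          (fun i => PySem.List.pyGetD nums i 0 == 6) := by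
  intro index hne hge
  have hlen : ¬ nums.length < 1 := by
    cases nums with
    | nil => exact absurd rfl hne
    | cons a t => simp
  by_cases hidx : index ≥ (nums.length : Int)
  · rw [array6]
    simp [hlen, hidx, PySem.List.pyRange_one_eq_nil hidx]
  · have hlt : index < (nums.length : Int) := lt_of_not_ge hidx
    rw [array6, PySem.List.pyRange_one_cons hlt]
    simp only [hlen, if_false, hidx, if_false, List.any_cons]
    by_cases h6 : PySem.List.pyGetD nums index 0 = 6
    · simp [h6]
    · have ih := array6_eq_any nums (index + 1) hne (by omega)
      simp [h6, ih]
termination_by index => ((nums.length : Int) - index).toNat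
decreasing_by omega

-- ===== VERDICT (by name: the statement is the Claim_ definition above) =====
theorem array6_spec : Claim_equal_array6 := by
  intro nums index _ hpre
  unfold Spec_array6 array6_alt
  cases hpre with
  | inl h => subst h; rw [array6]; simp
  | inr h =>
    cases hnil : nums with
    | nil => subst hnil; rw [array6]; simp
    | cons a t =>
      rw [← hnil]
      have hne : nums ≠ [] := by rw [hnil]; simp
      rw [array6_eq_any nums index hne h]
      simp [List.isEmpty_iff, hne]
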